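-- pv_equiv track=rewrite | github.com/zckr08/Proyecto-0-Codificaci-n | funciones.py | nuevoAbecedario
-- ===== SOURCE A (Python) =====
-- def prepararTexto(texto):
--     """Esta función va a preparar texto para que puedan ser procesados correctamente.
--        Entradas: texto = string
--        Salidas: texto preparado = string
--        Restricciones: texto debe ser un string
--     """
--     if type(texto) != str:
--         raise Exception("Debe ingresar un string")
--     texto = texto.lower()
--     texto = texto.replace("á", "a")
--     texto = texto.replace("é", "e")
--     texto = texto.replace("í", "i")
--     texto = texto.replace("ó", "o")
--     texto = texto.replace("ú", "u")
--     texto = texto.replace("ü", "u")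
--     return texto
--
-- def validarPalabra(texto):
--     """Esta es una función booleana que va a recibir un texto y va a verificar si contiene
--        únicamente letras.
--        Entradas: texto = String.
--        Salidas: True si el solo contiene letras y espacios.
--                 False en caso contrario.
--        Restricciones: texto debe ser un string.
--     """
--     if type(texto) != str:
--         raise Exception("Debe ingresar un string")
--     texto = prepararTexto(texto)
--     for caracter in texto:
--         if caracter not in ("abcdefghijklmnñopqrstuvwxyz"):
--             return False
--     return True
--
-- def nuevoAbecedario(palabra):
--     """Esta funcion tiene como objetivo crear un nuevo orden del abecedario a partir de una palabra clave.
--        Entradas: palabra = string de solo letras y espacios.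
--        Salidas: una lista con el alfabeto original y el alfabeto modificado.
--        Restricciones: palabra debe de ser un string que solo contenga espacios o letras.
--     """
--     if validarPalabra(palabra) != True or type(palabra) != str:
--         raise Exception("Error: La palabra clave solo debe contener letras.")
--     palabra = prepararTexto(palabra)
--     alfabeto = list("abcdefghijklmnñopqrstuvwxyz")
--     alfabetoNuevo = alfabeto.copy()
--     palabraF = ""
--     palabra = palabra.lower()
--     for letra in palabra:
--          if letra not in palabraF:
--               palabraF = palabraF+letra
--     for caracter in palabraF:
--         alfabetoNuevo.remove(caracter)
--     for caracter in palabraF: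
--         alfabetoNuevo.insert((palabraF.index(caracter)),caracter)
--     alfabetos = [alfabeto,alfabetoNuevo]
--     return alfabetos
-- ===== SOURCE B (Python) =====
-- def prepararTexto(texto):
--     if type(texto) != str:
--         raise Exception("Debe ingresar un string")
--     texto = texto.lower()
--     texto = texto.replace("á", "a")
--     texto = texto.replace("é", "e")
--     texto = texto.replace("í", "i")
--     texto = texto.replace("ó", "o")
--     texto = texto.replace("ú", "u")
--     texto = texto.replace("ü", "u")
--     return texto
--
-- def validarPalabra(texto):
--     if type(texto) != str:
--         raise Exception("Debe ingresar un string")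
--     texto = prepararTexto(texto)
--     for caracter in texto:
--         if caracter not in ("abcdefghijklmnñopqrstuvwxyz"):
--             return False
--     return True
--
-- def nuevoAbecedario(palabra):
--     if validarPalabra(palabra) != True or type(palabra) != str:
--         raise Exception("Error: La palabra clave solo debe contener letras.")
--     palabra = prepararTexto(palabra).lower()
--     alfabeto = list("abcdefghijklmnñopqrstuvwxyz")
--     prefijo = list(dict.fromkeys(palabra))
--     alfabetoNuevo = prefijo + [c for c in alfabeto if c not in prefijo]
--     return [alfabeto, alfabetoNuevo]
-- ===== Notes on version B (the rewrite author's own statement) =====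
-- stated objective: simpler
-- what changed: B deduplicates the keyword with dict.fromkeys and builds the new alphabet directly as the deduped prefix followed by one filtered pass over the original alphabet, instead of A's per-character remove() and insert() surgery (each a linear scan) on a copy of the alphabet.
import Mathlib
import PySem

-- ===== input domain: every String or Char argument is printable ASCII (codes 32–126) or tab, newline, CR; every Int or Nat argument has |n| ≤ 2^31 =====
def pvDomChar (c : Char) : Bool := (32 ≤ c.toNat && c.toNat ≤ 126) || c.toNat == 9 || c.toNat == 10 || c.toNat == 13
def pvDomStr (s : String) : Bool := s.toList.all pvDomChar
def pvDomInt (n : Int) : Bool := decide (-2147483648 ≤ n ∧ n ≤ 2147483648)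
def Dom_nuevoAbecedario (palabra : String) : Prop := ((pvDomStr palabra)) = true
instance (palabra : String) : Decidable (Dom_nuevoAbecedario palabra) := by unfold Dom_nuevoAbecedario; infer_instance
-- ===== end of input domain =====

-- B builds the reordered alphabet in one pass (dedup prefix ++ filtered alphabet) instead of A's
-- remove-then-insert surgery on a copy; objective: simpler. Equivalence of return values is proved below.


-- ===== PORT A =====
-- module helpers (identical source in Source A and Source B): prepararTexto, validarPalabra
def pvPrep (texto : String) : String :=
  let t := PySem.Str.lower texto
  let t := PySem.Str.replace t "á" "a"
  let t := PySem.Str.replace t "é" "e"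
  let t := PySem.Str.replace t "í" "i"
  let t := PySem.Str.replace t "ó" "o"
  let t := PySem.Str.replace t "ú" "u"
  let t := PySem.Str.replace t "ü" "u"
  t

def pvLetters : List Char := "abcdefghijklmnñopqrstuvwxyz".toList

-- a Python character (1-char string), as obtained by iterating / list() on a str
def pvMk1 (c : Char) : String := String.ofList [c]

-- the for-loop with an early `return False` is exactly List.all
def pvValidar (texto : String) : Bool :=
  (pvPrep texto).toList.all (fun caracter => pvLetters.contains caracter)

def nuevoAbecedario (palabra : String) : List (List String) :=
  if pvValidar palabra ≠ true then [] -- A raises here (Exception); excluded by Pre_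
  else
    let palabra := pvPrep palabra
    let alfabeto : List String := pvLetters.map pvMk1  -- list("abc…") = list of 1-char strings
    let alfabetoNuevo := alfabeto
    let palabra := PySem.Str.lower palabra
    -- palabraF = ""; for letra in palabra: if letra not in palabraF: palabraF += letra
    -- (the string palabraF is built char by char; a string of 1-char pieces is its List Char)
    let palabraF : List Char :=
      palabra.toList.foldl (fun acc letra => if acc.contains letra then acc else acc ++ [letra]) []
    -- for caracter in palabraF: alfabetoNuevo.remove(caracter)
    -- (list.remove would raise on an absent element; caracter is always present here, so getD is never taken)
    let alfabetoNuevo :=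
      palabraF.foldl (fun xs caracter => (PySem.List.remove? xs (pvMk1 caracter)).getD xs) alfabetoNuevo
    -- for caracter in palabraF: alfabetoNuevo.insert(palabraF.index(caracter), caracter)
    -- (str.index of a present single character = first index in the char list; .getD 0 is never taken)
    let alfabetoNuevo :=
      palabraF.foldl (fun xs caracter =>
        PySem.List.insert xs (((PySem.List.index? palabraF caracter).getD 0 : Nat) : Int) (pvMk1 caracter))
        alfabetoNuevo
    [alfabeto, alfabetoNuevo]

-- ===== PORT B =====
def nuevoAbecedario_alt (palabra : String) : List (List String) :=
  if pvValidar palabra ≠ true then [] -- same validation, same Exception; excluded by Pre_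
  else
    let palabra := PySem.Str.lower (pvPrep palabra)
    let alfabeto : List String := pvLetters.map pvMk1
    -- prefijo = list(dict.fromkeys(palabra))  (ordered dedup of the 1-char strings)
    let prefijo : List String := PySem.List.dedup (palabra.toList.map pvMk1)
    -- alfabetoNuevo = prefijo + [c for c in alfabeto if c not in prefijo]
    let alfabetoNuevo := prefijo ++ alfabeto.filter (fun c => !(prefijo.contains c))
    [alfabeto, alfabetoNuevo]

-- ===== PRECONDITION & SPEC =====
-- A raises an Exception exactly when some character survives prepararTexto (lowercase + accent
-- folding) as a non-letter; Pre_ states that closed-form: every character is a Latin letter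
-- (a-z / A-Z, including ñ/Ñ) or an accented vowel á é í ó ú ü (either case), which prepararTexto
-- maps into the alphabet. B raises the same Exception there. Note spaces are NOT accepted by A,
-- despite its docstring. (Inside Dom_ only the ASCII-letter cases occur.)
def Pre_nuevoAbecedario (palabra : String) : Prop :=
  (palabra.toList.all fun c =>
    ('a' ≤ c && c ≤ 'z') || ('A' ≤ c && c ≤ 'Z') ||
    "ñÑáéíóúüÁÉÍÓÚÜ".toList.contains c) = true
instance (palabra : String) : Decidable (Pre_nuevoAbecedario palabra) := by
  unfold Pre_nuevoAbecedario; infer_instance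

def pvWitness_nuevoAbecedario : String := "Hola"

def Spec_nuevoAbecedario (palabra : String) (out : List (List String)) : Prop := out = nuevoAbecedario_alt palabra
instance (palabra : String) (out : List (List String)) : Decidable (Spec_nuevoAbecedario palabra out) := by unfold Spec_nuevoAbecedario; infer_instance

-- ===== CLAIM (what is proved, stated in full; the proofs are below) =====
def Claim_equal_nuevoAbecedario : Prop := ∀ (palabra : String), Dom_nuevoAbecedario palabra → Pre_nuevoAbecedario palabra → Spec_nuevoAbecedario palabra (nuevoAbecedario palabra)

-- ===== LEMMAS AND PROOFS =====

-- A's dedup loop body is PySem.Set.add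
theorem pv_add_shape (acc : List Char) (c : Char) :
    (if acc.contains c then acc else acc ++ [c]) = PySem.Set.add acc c := by
  rw [PySem.Set.add_eq_ite]
  by_cases h : c ∈ acc <;> simp [h]

-- Set.ofList commutes with mapping an injective function
theorem pv_ofList_map (f : Char → String) (hf : Function.Injective f) (xs : List Char) :
    PySem.Set.ofList (xs.map f) = (PySem.Set.ofList xs).map f := by
  rw [PySem.Set.ofList_eq_foldl, PySem.Set.ofList_eq_foldl]
  suffices h : ∀ acc : List Char, (xs.map f).foldl PySem.Set.add (acc.map f) = (xs.foldl PySem.Set.add acc).map f by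
    simpa using h []
  induction xs with
  | nil => intro acc; simp
  | cons x xs ih =>
    intro acc
    have hstep : PySem.Set.add (acc.map f) (f x) = (PySem.Set.add acc x).map f := by
      by_cases h : x ∈ acc <;>
        simp [List.mem_map_of_injective hf, h]
    simp only [List.map_cons, List.foldl_cons, hstep, ih]

-- python list.remove(v) (present or not) followed by keeping the list on absence is List.erase
theorem pv_remove_getD (xs : List String) (v : String) :
    (PySem.List.remove? xs v).getD xs = xs.erase v := by
  by_cases h : v ∈ xs
  · rw [PySem.List.remove?_eq_some_erase xs v h]; rfl
  · rw [(PySem.List.remove?_eq_none_iff xs v).2 h, List.erase_of_not_mem h]; rfl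

theorem pv_idxOf?_map (f : Char → String) (hf : Function.Injective f) (xs : List Char) (c : Char) :
    List.idxOf? (f c) (xs.map f) = List.idxOf? c xs := by
  induction xs with
  | nil => rfl
  | cons x xs ih =>
    simp only [List.map_cons, List.idxOf?_cons]
    by_cases h : x = c
    · simp [h]
    · have hne : (f x == f c) = false := by simp [hf.ne h]
      simp [h, hne, ih, beq_iff_eq]

-- inserting each element of a duplicate-free w at its own first index, in order, prepends w
theorem pv_insert_fold_aux (w : List String) (hnd : w.Nodup) :
    ∀ (suf pre r : List String), w = pre ++ suf →
      suf.foldl (fun xs s => PySem.List.insert xs (((List.idxOf? s w).getD 0 : Nat) : Int) s) (pre ++ r)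
        = w ++ r := by
  intro suf
  induction suf with
  | nil => intro pre r h; simp [h]
  | cons c rest ih =>
    intro pre r h
    have hcpre : c ∉ pre := by
      have h2 := hnd
      rw [h, List.nodup_append] at h2
      exact fun hc => (h2.2.2 c hc c (by simp)) rfl
    have hidx : List.idxOf? c w = some pre.length := by
      rw [← PySem.List.index?_eq_idxOf?]
      exact (PySem.List.index?_eq_some_iff w c pre.length).2 ⟨pre, rest, h, rfl, hcpre⟩
    have hlen : pre.length ≤ (pre ++ r).length := by simp
    simp only [List.foldl_cons, hidx, Option.getD_some,
      PySem.List.insert_natCast (pre ++ r) pre.length c hlen]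
    rw [List.take_left, List.drop_left]
    have : pre ++ c :: r = (pre ++ [c]) ++ r := by simp
    rw [this, ih (pre ++ [c]) r (by simpa using h)]

theorem pv_insert_fold (w r : List String) (hnd : w.Nodup) :
    w.foldl (fun xs s => PySem.List.insert xs (((List.idxOf? s w).getD 0 : Nat) : Int) s) r = w ++ r := by
  simpa using pv_insert_fold_aux w hnd w [] r rfl

theorem pvMk1_inj : Function.Injective pvMk1 := by
  intro a b h
  have := congrArg String.toList h
  simp [pvMk1] at this
  exact this

theorem pv_letters_nodup : pvLetters.Nodup := by
  have : pvLetters = ['a','b','c','d','e','f','g','h','i','j','k','l','m','n','ñ','o','p','q','r','s','t','u','v','w','x','y','z'] := by rfl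
  rw [this]; decide

-- ===== VERDICT (by name: the statement is the Claim_ definition above) =====
theorem nuevoAbecedario_spec : Claim_equal_nuevoAbecedario := by
  intro palabra _ _
  unfold Spec_nuevoAbecedario nuevoAbecedario nuevoAbecedario_alt
  by_cases h : pvValidar palabra = true
  · simp only [h, ne_eq, not_true_eq_false, if_false]
    -- shared values
    set l : List Char := (PySem.Str.lower (pvPrep palabra)).toList with hl
    set alfabeto : List String := pvLetters.map pvMk1 with half
    -- A's dedup loop is Set.ofList l
    have hpf : l.foldl (fun acc letra => if acc.contains letra then acc else acc ++ [letra]) []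
        = PySem.Set.ofList l := by
      have hfun : (fun (acc : List Char) letra => if acc.contains letra then acc else acc ++ [letra])
          = PySem.Set.add := funext fun acc => funext fun c => pv_add_shape acc c
      rw [hfun, ← PySem.Set.ofList_eq_foldl]
    set pf : List Char := PySem.Set.ofList l with hpfdef
    -- B's prefix is pf mapped to 1-char strings
    have hprefijo : PySem.List.dedup (l.map pvMk1) = pf.map pvMk1 := by
      rw [PySem.List.dedup_eq_ofList, pv_ofList_map pvMk1 pvMk1_inj]
    set w : List String := pf.map pvMk1 with hw
    have hwnd : w.Nodup := (PySem.Set.nodup_ofList l).map pvMk1_inj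
    have hand : alfabeto.Nodup := pv_letters_nodup.map pvMk1_inj
    -- A's remove loop is alfabeto.diff w = the filter B computes
    have hrem : pf.foldl (fun xs caracter => (PySem.List.remove? xs (pvMk1 caracter)).getD xs) alfabeto
        = alfabeto.filter (fun c => !(w.contains c)) := by
      have h1 : pf.foldl (fun xs caracter => (PySem.List.remove? xs (pvMk1 caracter)).getD xs) alfabeto
          = pf.foldl (fun xs caracter => List.erase xs (pvMk1 caracter)) alfabeto := by
        have hfun : (fun (xs : List String) (caracter : Char) => (PySem.List.remove? xs (pvMk1 caracter)).getD xs)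
            = fun xs caracter => List.erase xs (pvMk1 caracter) :=
          funext fun xs => funext fun c => pv_remove_getD xs (pvMk1 c)
        rw [hfun]
      have h2 : pf.foldl (fun xs caracter => List.erase xs (pvMk1 caracter)) alfabeto
          = (pf.map pvMk1).foldl List.erase alfabeto :=
        (List.foldl_map (f := pvMk1) (g := List.erase) (l := pf) (init := alfabeto)).symm
      have h3 : (pf.map pvMk1).foldl List.erase alfabeto = alfabeto.diff (pf.map pvMk1) :=
        (List.diff_eq_foldl alfabeto (pf.map pvMk1)).symm
      rw [h1, h2, h3, ← hw, hand.diff_eq_filter]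
      apply List.filter_congr
      intro x _
      simp [List.contains_eq_mem]
    -- A's insert loop prepends w
    have hins : ∀ r : List String,
        pf.foldl (fun xs caracter =>
          PySem.List.insert xs (((PySem.List.index? pf caracter).getD 0 : Nat) : Int) (pvMk1 caracter)) r
        = w ++ r := by
      intro r
      have h2 : pf.foldl (fun xs caracter =>
            PySem.List.insert xs (((PySem.List.index? pf caracter).getD 0 : Nat) : Int) (pvMk1 caracter)) r
          = pf.foldl (fun xs caracter =>
            PySem.List.insert xs (((List.idxOf? (pvMk1 caracter) w).getD 0 : Nat) : Int) (pvMk1 caracter)) r := by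
        have hfun : (fun (xs : List String) (caracter : Char) =>
              PySem.List.insert xs (((PySem.List.index? pf caracter).getD 0 : Nat) : Int) (pvMk1 caracter))
            = fun xs caracter =>
              PySem.List.insert xs (((List.idxOf? (pvMk1 caracter) w).getD 0 : Nat) : Int) (pvMk1 caracter) := by
          funext xs c
          rw [PySem.List.index?_eq_idxOf?, hw, pv_idxOf?_map pvMk1 pvMk1_inj]
        rw [hfun]
      have h3 : pf.foldl (fun xs caracter =>
            PySem.List.insert xs (((List.idxOf? (pvMk1 caracter) w).getD 0 : Nat) : Int) (pvMk1 caracter)) r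
          = (pf.map pvMk1).foldl
            (fun xs s => PySem.List.insert xs (((List.idxOf? s w).getD 0 : Nat) : Int) s) r :=
        (List.foldl_map (f := pvMk1) (g := fun xs s => PySem.List.insert xs (((List.idxOf? s w).getD 0 : Nat) : Int) s) (l := pf) (init := r)).symm
      rw [h2, h3, ← hw]
      exact pv_insert_fold w r hwnd
    rw [hpf, hrem, hins, hprefijo]
  · simp [h]
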